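-- pv_equiv track=rewrite | github.com/Aurore-Wilbrink/CY-Tech_Bio-informatique_TP2 | agc/agc.py | get_unique_kmer
-- ===== SOURCE A (Python) =====
-- def cut_kmer(sequence, kmer_size):
--     """ From a sequence, generate kmers (length k)
--     :param sequence: sequence
--     :param kmer_size: length of a kmer
--     :return: kmers
--     """
--     seq = list(sequence)
--     for i in range(len(sequence) - kmer_size + 1):
--         kmer = []
--         for j in range(i, i + kmer_size):
--             kmer.append(seq[j])
--         yield "".join(kmer)
--
-- def get_unique_kmer(kmer_dict, sequence, id_seq, kmer_size):
--     """ Select only unique kmers in a dictionary of kmers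
--     :param kmer_dict: dictionary of kmers
--     :param sequence: sequence
--     :param id_seq: integer
--     :param kmer_size: integer
--     :return: dictionary of kmers
--     """
--     for kmer in cut_kmer(sequence, kmer_size):
--         if kmer in kmer_dict:
--             if not id_seq in kmer_dict[kmer]:
--                 kmer_dict[kmer].append(id_seq)
--         else:
--             kmer_dict[kmer] = [id_seq]
--     return kmer_dict
-- ===== SOURCE B (Python) =====
-- def get_unique_kmer(kmer_dict, sequence, id_seq, kmer_size):
--     """Index the distinct kmers of the sequence first, then update the dict
--     with one pass over its items plus one pass over the new kmers."""
--     kmers = dict.fromkeys(sequence[i:i + kmer_size]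
--                           for i in range(len(sequence) - kmer_size + 1))
--     for key, ids in kmer_dict.items():
--         if key in kmers and id_seq not in ids:
--             ids.append(id_seq)
--     for kmer in kmers:
--         if kmer not in kmer_dict:
--             kmer_dict[kmer] = [id_seq]
--     return kmer_dict
-- ===== Notes on version B (the rewrite author's own statement) =====
-- stated objective: idiomatic
-- what changed: B first builds the set of distinct kmers in first-appearance order with dict.fromkeys over slices, then updates the dict with one pass over its existing items followed by one pass appending the new kmers, instead of A's per-occurrence character-by-character kmer construction with a dict update per occurrence (slicing plus one dict update per distinct kmer rather than per occurrence).
-- outside the precondition, e.g. on get_unique_kmer({}, 'ab', 7, -1): A returns {'': [7]}, B returns {'a': [7], '': [7]}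
import Mathlib
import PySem

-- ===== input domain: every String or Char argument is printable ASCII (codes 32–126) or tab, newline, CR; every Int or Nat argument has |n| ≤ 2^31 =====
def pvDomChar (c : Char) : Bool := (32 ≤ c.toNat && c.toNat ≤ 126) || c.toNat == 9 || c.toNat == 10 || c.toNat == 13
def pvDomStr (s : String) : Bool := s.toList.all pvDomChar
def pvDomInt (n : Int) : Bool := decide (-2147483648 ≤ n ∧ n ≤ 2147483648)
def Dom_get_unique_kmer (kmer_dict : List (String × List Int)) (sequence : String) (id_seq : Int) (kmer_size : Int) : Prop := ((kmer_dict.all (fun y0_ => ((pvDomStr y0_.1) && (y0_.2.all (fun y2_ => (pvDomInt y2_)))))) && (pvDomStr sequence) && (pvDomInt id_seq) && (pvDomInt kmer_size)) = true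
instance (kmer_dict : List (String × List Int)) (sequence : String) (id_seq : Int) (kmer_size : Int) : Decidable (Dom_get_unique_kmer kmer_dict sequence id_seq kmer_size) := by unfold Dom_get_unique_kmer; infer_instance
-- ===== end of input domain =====

-- B indexes the distinct kmers first (dict.fromkeys over slices), then updates the dict in one pass
-- over its items plus one pass appending the new kmers (objective: idiomatic).  A mutates kmer_dict
-- in place and returns it; B performs the same in-place mutation; the equivalence proved here is
-- about the returned value.

-- ===== PORT A =====
def cut_kmer (sequence : String) (kmer_size : Int) : List String :=
  let seq := sequence.toList
  -- the generator is consumed by the caller's for-loop: ported as the list of yielded values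
  (PySem.List.pyRange 0 (PySem.Str.len sequence - kmer_size + 1) 1).foldl
    (fun acc i =>
      let kmer := (PySem.List.pyRange i (i + kmer_size) 1).foldl
        (fun km j => km ++ [PySem.List.pyGetD seq j ' ']) []   -- seq[j]: j is always in range here, so pyGetD's default is never used
      acc ++ [String.ofList kmer]) []

def get_unique_kmer (kmer_dict : List (String × List Int)) (sequence : String) (id_seq : Int) (kmer_size : Int) : List (String × List Int) :=
  ((cut_kmer sequence kmer_size).foldl
    (fun d kmer =>
      if d.contains kmer then
        if (d.getD kmer []).contains id_seq then d
        else d.modify kmer [] (fun v => v ++ [id_seq])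
      else d.insert kmer [id_seq])
    (PySem.Dict.mk kmer_dict)).items

-- ===== PORT B =====
def get_unique_kmer_alt (kmer_dict : List (String × List Int)) (sequence : String) (id_seq : Int) (kmer_size : Int) : List (String × List Int) :=
  let seq := sequence.toList
  let kmers := PySem.List.dedup
    ((PySem.List.pyRange 0 (PySem.Str.len sequence - kmer_size + 1) 1).map
      (fun i => String.ofList (PySem.List.slice seq (some i) (some (i + kmer_size)))))
  let d1 := PySem.Dict.mk (kmer_dict.map
    (fun p => if kmers.contains p.1 && !(p.2.contains id_seq) then (p.1, p.2 ++ [id_seq]) else p))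
  (kmers.foldl (fun d kmer => if d.contains kmer then d else d.insert kmer [id_seq]) d1).items

-- ===== PRECONDITION & SPEC =====
-- Pre_ excludes association lists with duplicate keys (they do not represent any Python dict, which
-- is what A receives) and negative kmer_size (outside the natural domain of a kmer length; A then
-- inserts empty-string kmers while B's slices differ).
def Pre_get_unique_kmer (kmer_dict : List (String × List Int)) (sequence : String) (id_seq : Int) (kmer_size : Int) : Prop :=
  (kmer_dict.map Prod.fst).Nodup ∧ 0 ≤ kmer_size
instance (kmer_dict : List (String × List Int)) (sequence : String) (id_seq : Int) (kmer_size : Int) : Decidable (Pre_get_unique_kmer kmer_dict sequence id_seq kmer_size) := by unfold Pre_get_unique_kmer; infer_instance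

def pvWitness_get_unique_kmer : (List (String × List Int)) × String × Int × Int :=
  ([("AC", [1]), ("CG", [3])], "ACG", 2, 2)

def Spec_get_unique_kmer (kmer_dict : List (String × List Int)) (sequence : String) (id_seq : Int) (kmer_size : Int) (out : List (String × List Int)) : Prop := out = get_unique_kmer_alt kmer_dict sequence id_seq kmer_size
instance (kmer_dict : List (String × List Int)) (sequence : String) (id_seq : Int) (kmer_size : Int) (out : List (String × List Int)) : Decidable (Spec_get_unique_kmer kmer_dict sequence id_seq kmer_size out) := by unfold Spec_get_unique_kmer; infer_instance

-- ===== CLAIM (what is proved, stated in full; the proofs are below) =====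
def Claim_equal_get_unique_kmer : Prop := ∀ (kmer_dict : List (String × List Int)) (sequence : String) (id_seq : Int) (kmer_size : Int), Dom_get_unique_kmer kmer_dict sequence id_seq kmer_size → Pre_get_unique_kmer kmer_dict sequence id_seq kmer_size → Spec_get_unique_kmer kmer_dict sequence id_seq kmer_size (get_unique_kmer kmer_dict sequence id_seq kmer_size)

-- ===== LEMMAS AND PROOFS =====

-- A's per-occurrence dict update and B's per-distinct-kmer update, named for the proofs
def pvStepA (id_seq : Int) (d : PySem.Dict String (List Int)) (kmer : String) : PySem.Dict String (List Int) :=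
  if d.contains kmer then
    if (d.getD kmer []).contains id_seq then d
    else d.modify kmer [] (fun v => v ++ [id_seq])
  else d.insert kmer [id_seq]

def pvAddB (id_seq : Int) (d : PySem.Dict String (List Int)) (kmer : String) : PySem.Dict String (List Int) :=
  if d.contains kmer then d else d.insert kmer [id_seq]

def pvUpdB (kmers : List String) (id_seq : Int) (p : String × List Int) : String × List Int :=
  if kmers.contains p.1 && !(p.2.contains id_seq) then (p.1, p.2 ++ [id_seq]) else p

-- "k has been fully processed for id_seq"
def pvDone (id_seq : Int) (d : PySem.Dict String (List Int)) (k : String) : Prop :=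
  d.contains k = true ∧ id_seq ∈ d.getD k []

lemma pvUpdB_fst (S : List String) (id_seq : Int) (p : String × List Int) :
    (pvUpdB S id_seq p).1 = p.1 := by
  unfold pvUpdB; split <;> rfl

lemma pvDone_stepA (id_seq : Int) (d : PySem.Dict String (List Int)) (k : String) :
    pvDone id_seq (pvStepA id_seq d k) k := by
  unfold pvStepA pvDone
  by_cases hc : d.contains k = true
  · by_cases hid : id_seq ∈ d.getD k []
    · simp [hc, hid]
    · rw [if_pos hc, if_neg (by simpa using hid)]
      refine ⟨?_, ?_⟩
      · simp [PySem.Dict.contains_modify, hc]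
      · rw [PySem.Dict.getD_modify_self]
        simp
  · rw [if_neg (by simp [hc])]
    refine ⟨?_, ?_⟩
    · simp
    · rw [PySem.Dict.getD_insert_self]
      simp

lemma pvDone_mono (id_seq : Int) (d : PySem.Dict String (List Int)) (k k' : String)
    (h : pvDone id_seq d k) : pvDone id_seq (pvStepA id_seq d k') k := by
  obtain ⟨h1, h2⟩ := h
  by_cases hkk : k' = k
  · subst hkk
    unfold pvStepA
    rw [if_pos h1, if_pos (by simpa using h2)]
    exact ⟨h1, h2⟩
  · unfold pvStepA pvDone
    by_cases hc : d.contains k' = true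
    · by_cases hid : id_seq ∈ d.getD k' []
      · simp [hc, hid, h1, h2]
      · rw [if_pos hc, if_neg (by simpa using hid)]
        refine ⟨?_, ?_⟩
        · simp [PySem.Dict.contains_modify, h1]
        · rw [PySem.Dict.getD_modify_of_ne _ _ _ (fun he => hkk he.symm)]
          exact h2
    · rw [if_neg (by simp [hc])]
      refine ⟨?_, ?_⟩
      · simp [PySem.Dict.contains_insert, h1]
      · rw [PySem.Dict.getD_insert_of_ne _ _ _ (fun he => hkk he.symm)]
        exact h2

lemma pvStepA_of_done (id_seq : Int) (d : PySem.Dict String (List Int)) (k : String)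
    (h : pvDone id_seq d k) : pvStepA id_seq d k = d := by
  unfold pvStepA
  rw [if_pos h.1, if_pos (by simpa using h.2)]

lemma pvDone_foldl (id_seq : Int) (L : List String) (k : String) :
    ∀ d : PySem.Dict String (List Int),
    pvDone id_seq d k → pvDone id_seq (L.foldl (pvStepA id_seq) d) k := by
  induction L with
  | nil => intro d h; exact h
  | cons x xs ih =>
    intro d h
    simp only [List.foldl_cons]
    exact ih _ (pvDone_mono _ _ _ _ h)

lemma pvDone_foldl_mem (id_seq : Int) (L : List String) (k : String) :
    ∀ d : PySem.Dict String (List Int),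
    k ∈ L → pvDone id_seq (L.foldl (pvStepA id_seq) d) k := by
  induction L with
  | nil => intro d hk; cases hk
  | cons x xs ih =>
    intro d hk
    simp only [List.foldl_cons]
    rcases List.mem_cons.mp hk with h | h
    · subst h
      exact pvDone_foldl _ _ _ _ (pvDone_stepA _ _ _)
    · exact ih _ h

-- A may process the same kmer many times; only its first occurrence matters
lemma pvFoldl_dedup (id_seq : Int) (L : List String) (d : PySem.Dict String (List Int)) :
    L.foldl (pvStepA id_seq) d = (PySem.List.dedup L).foldl (pvStepA id_seq) d := by
  unfold PySem.List.dedup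
  induction L using List.reverseRecOn with
  | nil => rfl
  | append_singleton xs x ih =>
    rw [List.foldl_append]
    simp only [List.foldl_cons, List.foldl_nil]
    rw [PySem.Set.ofList_append_singleton]
    by_cases hx : x ∈ PySem.Set.ofList xs
    · rw [PySem.Set.add_of_mem hx, ← ih]
      exact pvStepA_of_done _ _ _
        (pvDone_foldl_mem _ xs x d ((PySem.Set.mem_ofList xs x).mp hx))
    · rw [PySem.Set.add_of_not_mem hx, List.foldl_append]
      simp only [List.foldl_cons, List.foldl_nil]
      rw [ih]

lemma pvContains_mk_map_updB (l : List (String × List Int)) (S : List String) (id_seq : Int) (k : String) :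
    (PySem.Dict.mk (l.map (pvUpdB S id_seq))).contains k = (PySem.Dict.mk l).contains k := by
  show (l.map (pvUpdB S id_seq)).any (fun p => p.1 == k) = l.any (fun p => p.1 == k)
  rw [List.any_map]
  exact List.any_congr rfl (fun p => by simp [Function.comp, pvUpdB_fst])

-- the main correspondence: over the DISTINCT kmers, A's fold equals B's "map then add the new keys"
lemma pvMain (id_seq : Int) (S : List String) : ∀ (d : PySem.Dict String (List Int)),
    S.Nodup → d.keys.Nodup →
    S.foldl (pvStepA id_seq) d
      = S.foldl (pvAddB id_seq) (PySem.Dict.mk (d.items.map (pvUpdB S id_seq))) := by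
  induction S with
  | nil =>
    intro d _ _
    simp only [List.foldl_nil]
    apply PySem.Dict.ext
    show d.items = d.items.map (pvUpdB [] id_seq)
    rw [List.map_congr_left (g := fun p => p) (fun p _ => by unfold pvUpdB; simp)]
    simp
  | cons k S' ih =>
    intro d hS hd
    have hkS' : k ∉ S' := (List.nodup_cons.mp hS).1
    have hS' : S'.Nodup := (List.nodup_cons.mp hS).2
    have hkS'c : S'.contains k = false := by simpa using hkS'
    simp only [List.foldl_cons]
    by_cases hc : d.contains k = true
    · -- k already a key of d
      have hMc : (PySem.Dict.mk (d.items.map (pvUpdB (k :: S') id_seq))).contains k = true := by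
        rw [pvContains_mk_map_updB]; exact hc
      rw [show pvAddB id_seq (PySem.Dict.mk (d.items.map (pvUpdB (k :: S') id_seq))) k
            = PySem.Dict.mk (d.items.map (pvUpdB (k :: S') id_seq)) by
        unfold pvAddB; rw [if_pos hMc]]
      by_cases hid : id_seq ∈ d.getD k []
      · -- id_seq already recorded: A leaves d unchanged, B's map leaves the entry unchanged
        rw [show pvStepA id_seq d k = d by
          unfold pvStepA; rw [if_pos hc, if_pos (by simpa using hid)]]
        rw [ih d hS' hd]
        have hM : PySem.Dict.mk (d.items.map (pvUpdB S' id_seq))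
            = PySem.Dict.mk (d.items.map (pvUpdB (k :: S') id_seq)) := by
          apply PySem.Dict.ext
          show d.items.map (pvUpdB S' id_seq) = d.items.map (pvUpdB (k :: S') id_seq)
          apply List.map_congr_left
          intro p hp
          by_cases hpk : p.1 = k
          · have hpv : p.2 = d.getD k [] :=
              (PySem.Dict.getD_of_mem_items (d := d) (k := k) (v := p.2)
                (by rw [← hpk]; simpa using hp) hd []).symm
            unfold pvUpdB
            rw [show ((p.2.contains id_seq) : Bool) = true by rw [hpv]; simpa using hid]
            simp
          · unfold pvUpdB
            simp only [List.contains_cons]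
            rw [show (p.1 == k) = false by simpa using hpk]
            simp
        rw [hM]
      · -- append id_seq to d[k]
        rw [show pvStepA id_seq d k = d.insert k ((d.getD k []) ++ [id_seq]) by
          unfold pvStepA; rw [if_pos hc, if_neg (by simpa using hid)]; rfl]
        have hd' : (d.insert k ((d.getD k []) ++ [id_seq])).keys.Nodup :=
          PySem.Dict.nodup_keys_insert _ _ _ hd
        rw [ih _ hS' hd']
        have hM : PySem.Dict.mk ((d.insert k ((d.getD k []) ++ [id_seq])).items.map (pvUpdB S' id_seq))
            = PySem.Dict.mk (d.items.map (pvUpdB (k :: S') id_seq)) := by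
          apply PySem.Dict.ext
          show (d.insert k ((d.getD k []) ++ [id_seq])).items.map (pvUpdB S' id_seq)
              = d.items.map (pvUpdB (k :: S') id_seq)
          rw [PySem.Dict.items_insert_of_contains _ _ hc, List.map_map]
          apply List.map_congr_left
          intro p hp
          by_cases hpk : p.1 = k
          · have hpv : p.2 = d.getD k [] :=
              (PySem.Dict.getD_of_mem_items (d := d) (k := k) (v := p.2)
                (by rw [← hpk]; simpa using hp) hd []).symm
            have hbk : (p.1 == k) = true := by simpa using hpk
            simp only [Function.comp_apply, hbk, if_true]
            conv_rhs => rw [show p = (k, d.getD k []) from Prod.ext hpk hpv]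
            unfold pvUpdB
            simp only [List.contains_cons, hkS'c]
            simp [hid]
          · have hbk : (p.1 == k) = false := by simpa using hpk
            simp only [Function.comp_apply, hbk, Bool.false_eq_true, if_false]
            unfold pvUpdB
            simp only [List.contains_cons, hbk]
            simp
        rw [hM]
    · -- k is a new key: appended at the end by both
      have hcf : d.contains k = false := by simpa using hc
      have hnk : ∀ p ∈ d.items, (p.1 == k) = false := by
        intro p hp
        simpa using (List.any_eq_false.mp hcf) p hp
      have hMc : (PySem.Dict.mk (d.items.map (pvUpdB (k :: S') id_seq))).contains k = false := by
        rw [pvContains_mk_map_updB]; exact hcf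
      rw [show pvStepA id_seq d k = d.insert k [id_seq] by
        unfold pvStepA; rw [if_neg (by simp [hcf])]]
      rw [show pvAddB id_seq (PySem.Dict.mk (d.items.map (pvUpdB (k :: S') id_seq))) k
            = (PySem.Dict.mk (d.items.map (pvUpdB (k :: S') id_seq))).insert k [id_seq] by
        unfold pvAddB; rw [if_neg (by simp [hMc])]]
      have hd' : (d.insert k [id_seq]).keys.Nodup := PySem.Dict.nodup_keys_insert _ _ _ hd
      rw [ih _ hS' hd']
      have hM : (PySem.Dict.mk (d.items.map (pvUpdB (k :: S') id_seq))).insert k [id_seq]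
          = PySem.Dict.mk ((d.insert k [id_seq]).items.map (pvUpdB S' id_seq)) := by
        apply PySem.Dict.ext
        rw [PySem.Dict.items_insert_of_not_contains _ _ hMc]
        rw [PySem.Dict.items_insert_of_not_contains _ _ hcf]
        show d.items.map (pvUpdB (k :: S') id_seq) ++ [(k, [id_seq])]
            = (d.items ++ [(k, [id_seq])]).map (pvUpdB S' id_seq)
        rw [List.map_append]
        congr 1
        · apply List.map_congr_left
          intro p hp
          unfold pvUpdB
          simp only [List.contains_cons, hnk p hp]
          simp
        · show [(k, [id_seq])] = [pvUpdB S' id_seq (k, [id_seq])]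
          unfold pvUpdB
          simp
      rw [hM]

-- B's slice equals the range of characters A collects one by one
lemma pvSlice_eq_map {α : Type} (xs : List α) (a b : Int) (dflt : α)
    (ha : 0 ≤ a) (hb0 : 0 ≤ b) (hb : b ≤ (xs.length : Int)) :
    PySem.List.slice xs (some a) (some b)
      = (PySem.List.pyRange a b 1).map (fun j => PySem.List.pyGetD xs j dflt) := by
  rw [PySem.List.slice_toNat (a := a) (b := b) xs ha hb0, PySem.List.pyRange_one, List.map_map]
  apply List.ext_getElem
  · simp
    omega
  · intro i h1 h2
    simp only [List.getElem_take, List.getElem_drop, List.getElem_map, List.getElem_range,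
      Function.comp_apply]
    rw [PySem.List.pyGetD_eq_getElem xs dflt (by omega) (by
      simp at h2
      omega)]
    congr 1
    omega

lemma pvCut_kmer_eq (s : String) (k : Int) (hk : 0 ≤ k) :
    cut_kmer s k
      = (PySem.List.pyRange 0 (PySem.Str.len s - k + 1) 1).map
          (fun i => String.ofList (PySem.List.slice s.toList (some i) (some (i + k)))) := by
  show (PySem.List.pyRange 0 (PySem.Str.len s - k + 1) 1).foldl
      (fun acc i => acc ++ [String.ofList ((PySem.List.pyRange i (i + k) 1).foldl
        (fun km j => km ++ [PySem.List.pyGetD s.toList j ' ']) [])]) [] = _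
  rw [PySem.List.foldl_append_singleton_eq_map
    (f := fun i => String.ofList ((PySem.List.pyRange i (i + k) 1).foldl
      (fun km j => km ++ [PySem.List.pyGetD s.toList j ' ']) []))]
  rw [List.nil_append]
  apply List.map_congr_left
  intro i hi
  have hi' := PySem.List.mem_pyRange_one.mp hi
  congr 1
  rw [PySem.List.foldl_append_singleton_eq_map (f := fun j => PySem.List.pyGetD s.toList j ' ')]
  rw [List.nil_append]
  rw [pvSlice_eq_map s.toList i (i + k) ' ' hi'.1 (by omega) (by
    have := hi'.2
    rw [PySem.Str.len_eq] at this
    omega)]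

-- ===== VERDICT (by name: the statement is the Claim_ definition above) =====
theorem get_unique_kmer_spec : Claim_equal_get_unique_kmer := by
  intro kmer_dict sequence id_seq kmer_size _ hpre
  unfold Spec_get_unique_kmer
  obtain ⟨hnd, hk⟩ := hpre
  show ((cut_kmer sequence kmer_size).foldl (pvStepA id_seq) (PySem.Dict.mk kmer_dict)).items = _
  rw [pvCut_kmer_eq sequence kmer_size hk]
  rw [pvFoldl_dedup]
  have hkeys : (PySem.Dict.mk kmer_dict).keys.Nodup := by
    simpa [PySem.Dict.keys_mk] using hnd
  rw [pvMain id_seq _ (PySem.Dict.mk kmer_dict)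
    (by unfold PySem.List.dedup; exact PySem.Set.nodup_ofList _) hkeys]
  rfl
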